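-- pv_equiv track=rewrite | github.com/valik94/PythonProblems | labs109.py | maximum_difference_sublist
-- ===== SOURCE A (Python) =====
-- def maximum_difference_sublist(items, k = 2):
--     m, mpos = 0, 0
--     for i in range(len(items) - k + 1):
--         sub = items[i:i+k]
--         diff = max(sub) - min(sub)
--         if diff > m:
--             m = diff
--             mpos = i
--     return items[mpos:mpos+k]
-- ===== SOURCE B (Python) =====
-- # Amortized O(1) sliding min/max queue built from two stacks whose entries carry
-- # (value, running max, running min); one pass over items instead of max/min per window.
-- def _push(stack, x):
--     if stack:
--         _, mx, mn = stack[-1]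
--         stack.append((x, mx if mx > x else x, mn if mn < x else x))
--     else:
--         stack.append((x, x, x))
--
-- def _tops(out, inn):
--     if out and inn:
--         return (max(out[-1][1], inn[-1][1]), min(out[-1][2], inn[-1][2]))
--     elif out:
--         return (out[-1][1], out[-1][2])
--     else:
--         return (inn[-1][1], inn[-1][2])
--
-- def maximum_difference_sublist(items, k=2):
--     inn, out = [], []
--     m, mpos = 0, 0
--     for i in range(len(items)):
--         _push(inn, items[i])
--         if i >= k:
--             # drop the element that slid out of the window
--             if not out:
--                 while inn:
--                     v, _, _ = inn.pop()
--                     _push(out, v)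
--             out.pop()
--         if i >= k - 1:
--             hi, lo = _tops(out, inn)
--             d = hi - lo
--             if d > m:
--                 m, mpos = d, i - k + 1
--     return items[mpos:mpos + k]
-- ===== Notes on version B (the rewrite author's own statement) =====
-- stated objective: faster
-- what changed: Replaces the per-window max()/min() rescans with a single pass maintaining a two-stack min/max queue (each stack entry carries the value plus running max/min), so each element is pushed and popped at most twice.
-- outside the precondition, e.g. on maximum_difference_sublist([], 0): A raises ValueError, B returns []; on maximum_difference_sublist([1, 2], 0): A raises ValueError, B raises IndexError
import Mathlib
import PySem

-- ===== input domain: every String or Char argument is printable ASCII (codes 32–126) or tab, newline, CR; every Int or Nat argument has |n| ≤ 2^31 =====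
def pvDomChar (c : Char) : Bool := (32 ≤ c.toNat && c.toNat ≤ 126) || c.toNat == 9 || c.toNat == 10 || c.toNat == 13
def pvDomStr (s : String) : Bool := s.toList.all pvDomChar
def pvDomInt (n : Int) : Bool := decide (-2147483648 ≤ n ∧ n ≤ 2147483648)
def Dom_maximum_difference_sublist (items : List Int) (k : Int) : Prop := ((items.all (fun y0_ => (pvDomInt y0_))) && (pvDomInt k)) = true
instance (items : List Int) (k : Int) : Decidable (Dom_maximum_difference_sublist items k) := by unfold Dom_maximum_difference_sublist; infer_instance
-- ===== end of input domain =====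

-- B is faster: one pass with a two-stack min/max queue instead of rescanning each size-k window.

-- ===== PORT A =====
-- loop body of A's 'for i in range(len(items) - k + 1)'
def mdsStepA (items : List Int) (k : Int) (s : Int × Int) (i : Int) : Int × Int :=
  let sub := PySem.List.slice items (some i) (some (i + k))
  -- max(sub)/min(sub) raise ValueError on an empty sub (k ≤ 0); excluded by Pre_
  let diff := ((PySem.List.max? sub (fun y => y)).getD 0) - ((PySem.List.min? sub (fun y => y)).getD 0)
  if diff > s.1 then (diff, i) else s

def maximum_difference_sublist (items : List Int) (k : Int) : List Int :=
  let st := (PySem.List.pyRange 0 ((items.length : Int) - k + 1) 1).foldl (mdsStepA items k) (0, 0)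
  PySem.List.slice items (some st.2) (some (st.2 + k))

-- ===== PORT B =====
-- Stacks are Lean lists with the head as the top (Python: last element is the top).
-- Python helper _push(stack, x)
def pvPush (x : Int) (st : List (Int × Int × Int)) : List (Int × Int × Int) :=
  match st with
  | [] => [(x, x, x)]
  | (_, mx, mn) :: _ => (x, if mx > x then mx else x, if mn < x then mn else x) :: st

-- Python 'while inn: v,_,_ = inn.pop(); _push(out, v)'
def pvTransfer : List (Int × Int × Int) → List (Int × Int × Int) → List (Int × Int × Int)
  | [], out => out
  | (v, _, _) :: rest, out => pvTransfer rest (pvPush v out)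

-- Python helper _tops(out, inn)
def pvTops (out inn : List (Int × Int × Int)) : Int × Int :=
  match out, inn with
  | (_, omx, omn) :: _, (_, imx, imn) :: _ => (max omx imx, min omn imn)
  | (_, omx, omn) :: _, [] => (omx, omn)
  | [], (_, imx, imn) :: _ => (imx, imn)
  | [], [] => (0, 0)  -- Python raises IndexError here; reachable only when k ≤ 0, outside Pre_

-- loop body of B's 'for i in range(len(items))'; state (inn, out, m, mpos)
def mdsStepB (items : List Int) (k : Int)
    (s : List (Int × Int × Int) × List (Int × Int × Int) × Int × Int) (i : Int) :
    List (Int × Int × Int) × List (Int × Int × Int) × Int × Int :=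
  let inn1 := pvPush (PySem.List.pyGetD items i 0) s.1
  let p2 : List (Int × Int × Int) × List (Int × Int × Int) :=
    if k ≤ i then
      -- Python: out.pop() on an empty out raises IndexError; only reachable when k ≤ 0, outside Pre_
      if s.2.1.isEmpty then ([], (pvTransfer inn1 []).tail) else (inn1, s.2.1.tail)
    else (inn1, s.2.1)
  let mm : Int × Int :=
    if k - 1 ≤ i then
      let hl := pvTops p2.2 p2.1
      let d := hl.1 - hl.2
      if d > s.2.2.1 then (d, i - k + 1) else (s.2.2.1, s.2.2.2)
    else (s.2.2.1, s.2.2.2)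
  -- (m, mpos) kept as the pair mm
  (p2.1, p2.2, mm)

def maximum_difference_sublist_alt (items : List Int) (k : Int) : List Int :=
  let st := (PySem.List.pyRange 0 (items.length : Int) 1).foldl (mdsStepB items k) ([], [], 0, 0)
  PySem.List.slice items (some st.2.2.2) (some (st.2.2.2 + k))

-- ===== PRECONDITION & SPEC =====
-- A raises ValueError (max of an empty window slice) for every k ≤ 0; Pre_ excludes exactly those inputs.
def Pre_maximum_difference_sublist (items : List Int) (k : Int) : Prop := 1 ≤ k
instance (items : List Int) (k : Int) : Decidable (Pre_maximum_difference_sublist items k) := by unfold Pre_maximum_difference_sublist; infer_instance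
def pvWitness_maximum_difference_sublist : List Int × Int := ([3, 1, 4], 2)

def Spec_maximum_difference_sublist (items : List Int) (k : Int) (out : List Int) : Prop := out = maximum_difference_sublist_alt items k
instance (items : List Int) (k : Int) (out : List Int) : Decidable (Spec_maximum_difference_sublist items k out) := by unfold Spec_maximum_difference_sublist; infer_instance

-- ===== CLAIM (what is proved, stated in full; the proofs are below) =====
def Claim_equal_maximum_difference_sublist : Prop := ∀ (items : List Int) (k : Int), Dom_maximum_difference_sublist items k → Pre_maximum_difference_sublist items k → Spec_maximum_difference_sublist items k (maximum_difference_sublist items k)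

-- ===== LEMMAS AND PROOFS =====

-- max/min of a nonempty list, as A's running loops compute them
def pvMx : List Int → Int
  | [] => 0
  | v :: t => t.foldl max v

def pvMn : List Int → Int
  | [] => 0
  | v :: t => t.foldl min v

lemma pvMx_maximum (v : Int) (t : List Int) : (pvMx (v :: t) : WithBot Int) = (v :: t).maximum := by
  induction t generalizing v with
  | nil => simp [pvMx]
  | cons c r ih =>
    have h1 : pvMx (v :: c :: r) = pvMx (max v c :: r) := by simp [pvMx]
    rw [h1, ih, List.maximum_cons, List.maximum_cons, List.maximum_cons, WithBot.coe_max, max_assoc]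

lemma pvMn_minimum (v : Int) (t : List Int) : (pvMn (v :: t) : WithTop Int) = (v :: t).minimum := by
  induction t generalizing v with
  | nil => simp [pvMn]
  | cons c r ih =>
    have h1 : pvMn (v :: c :: r) = pvMn (min v c :: r) := by simp [pvMn]
    rw [h1, ih, List.minimum_cons, List.minimum_cons, List.minimum_cons, WithTop.coe_min, min_assoc]

lemma pvMx_reverse (l : List Int) : pvMx l.reverse = pvMx l := by
  cases l with
  | nil => rfl
  | cons v t =>
    obtain ⟨w, u, hu⟩ := List.exists_cons_of_ne_nil (l := (v :: t).reverse) (by simp)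
    have : ((pvMx ((v :: t).reverse) : WithBot Int)) = (pvMx (v :: t) : WithBot Int) := by
      rw [hu, pvMx_maximum, ← hu, pvMx_maximum, List.Perm.maximum_eq (List.reverse_perm _)]
    exact_mod_cast this

lemma pvMn_reverse (l : List Int) : pvMn l.reverse = pvMn l := by
  cases l with
  | nil => rfl
  | cons v t =>
    obtain ⟨w, u, hu⟩ := List.exists_cons_of_ne_nil (l := (v :: t).reverse) (by simp)
    have : ((pvMn ((v :: t).reverse) : WithTop Int)) = (pvMn (v :: t) : WithTop Int) := by
      rw [hu, pvMn_minimum, ← hu, pvMn_minimum, List.Perm.minimum_eq (List.reverse_perm _)]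
    exact_mod_cast this

lemma pvMx_append (l1 l2 : List Int) (h1 : l1 ≠ []) (h2 : l2 ≠ []) :
    pvMx (l1 ++ l2) = max (pvMx l1) (pvMx l2) := by
  obtain ⟨v, t, rfl⟩ := List.exists_cons_of_ne_nil h1
  obtain ⟨w, u, rfl⟩ := List.exists_cons_of_ne_nil h2
  have : ((pvMx ((v :: t) ++ (w :: u)) : WithBot Int)) = ((max (pvMx (v :: t)) (pvMx (w :: u)) : Int) : WithBot Int) := by
    rw [show (v :: t) ++ (w :: u) = v :: (t ++ w :: u) from rfl, pvMx_maximum, WithBot.coe_max,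
      pvMx_maximum, pvMx_maximum, ← List.maximum_append]
    rfl
  exact_mod_cast this

lemma pvMn_append (l1 l2 : List Int) (h1 : l1 ≠ []) (h2 : l2 ≠ []) :
    pvMn (l1 ++ l2) = min (pvMn l1) (pvMn l2) := by
  obtain ⟨v, t, rfl⟩ := List.exists_cons_of_ne_nil h1
  obtain ⟨w, u, rfl⟩ := List.exists_cons_of_ne_nil h2
  have : ((pvMn ((v :: t) ++ (w :: u)) : WithTop Int)) = ((min (pvMn (v :: t)) (pvMn (w :: u)) : Int) : WithTop Int) := by
    rw [show (v :: t) ++ (w :: u) = v :: (t ++ w :: u) from rfl, pvMn_minimum, WithTop.coe_min,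
      pvMn_minimum, pvMn_minimum, ← List.minimum_append]
    rfl
  exact_mod_cast this

lemma pvMx_cons (x : Int) (l : List Int) (h : l ≠ []) : pvMx (x :: l) = max x (pvMx l) := by
  obtain ⟨v, t, rfl⟩ := List.exists_cons_of_ne_nil h
  simp [pvMx, List.foldl_assoc]

lemma pvMn_cons (x : Int) (l : List Int) (h : l ≠ []) : pvMn (x :: l) = min x (pvMn l) := by
  obtain ⟨v, t, rfl⟩ := List.exists_cons_of_ne_nil h
  simp [pvMn, List.foldl_assoc]

-- the annotated stack holding values l (head = top): aux fields = max/min of the entry and everything below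
def pvAnn : List Int → List (Int × Int × Int)
  | [] => []
  | x :: r => (x, pvMx (x :: r), pvMn (x :: r)) :: pvAnn r

lemma pvAnn_push (x : Int) (l : List Int) : pvPush x (pvAnn l) = pvAnn (x :: l) := by
  cases l with
  | nil => simp [pvPush, pvAnn, pvMx, pvMn]
  | cons v t =>
    simp only [pvAnn, pvPush]
    have hmx : (if pvMx (v :: t) > x then pvMx (v :: t) else x) = pvMx (x :: v :: t) := by
      rw [pvMx_cons x (v :: t) (by simp)]; split_ifs <;> omega
    have hmn : (if pvMn (v :: t) < x then pvMn (v :: t) else x) = pvMn (x :: v :: t) := by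
      rw [pvMn_cons x (v :: t) (by simp)]; split_ifs <;> omega
    rw [hmx, hmn]

lemma pvAnn_transfer (l acc : List Int) :
    pvTransfer (pvAnn l) (pvAnn acc) = pvAnn (l.reverse ++ acc) := by
  induction l generalizing acc with
  | nil => simp [pvAnn, pvTransfer]
  | cons v r ih =>
    show pvTransfer (pvAnn r) (pvPush v (pvAnn acc)) = _
    rw [pvAnn_push, ih, List.reverse_cons, List.append_assoc]
    rfl

lemma pvAnn_tail (l : List Int) : (pvAnn l).tail = pvAnn l.tail := by
  cases l <;> simp [pvAnn]

lemma pvAnn_isEmpty (l : List Int) : (pvAnn l).isEmpty = l.isEmpty := by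
  cases l <;> simp [pvAnn]

lemma pvTops_ann (ov iv : List Int) (v : Int) (t : List Int) (h : ov ++ iv.reverse = v :: t) :
    pvTops (pvAnn ov) (pvAnn iv) = (pvMx (v :: t), pvMn (v :: t)) := by
  cases ov with
  | nil =>
    cases iv with
    | nil => simp at h
    | cons b u =>
      simp only [List.nil_append] at h
      rw [← h, pvMx_reverse, pvMn_reverse]
      simp [pvAnn, pvTops]
  | cons a s =>
    cases iv with
    | nil =>
      simp only [List.reverse_nil, List.append_nil] at h
      rw [← h]; simp [pvAnn, pvTops]
    | cons b u =>
      rw [← h, pvMx_append _ _ (by simp) (by simp), pvMn_append _ _ (by simp) (by simp),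
        pvMx_reverse, pvMn_reverse]
      simp [pvAnn, pvTops]

-- A's diff over a nonempty window equals pvMx - pvMn
lemma mdsStepA_eq (items : List Int) (k : Int) (s : Int × Int) (i : Int)
    (v : Int) (t : List Int)
    (hsub : PySem.List.slice items (some i) (some (i + k)) = v :: t) :
    mdsStepA items k s i =
      (if pvMx (v :: t) - pvMn (v :: t) > s.1 then (pvMx (v :: t) - pvMn (v :: t), i) else s) := by
  simp [mdsStepA, hsub, PySem.List.max?_id_cons, PySem.List.min?_id_cons, pvMx, pvMn]

-- the window of the last (at most kn) of the first p elements
def pvWnd (items : List Int) (kn p : Nat) : List Int := (items.take p).drop (p - kn)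

lemma pvWnd_ne_nil (items : List Int) (kn p : Nat) (h1 : 1 ≤ kn) (h2 : 1 ≤ p)
    (h3 : p ≤ items.length) : pvWnd items kn p ≠ [] := by
  apply List.ne_nil_of_length_pos
  simp only [pvWnd, List.length_drop, List.length_take]
  omega

lemma pvWnd_grow (items : List Int) (kn p : Nat) (hko : p < kn) (hplen : p < items.length) :
    pvWnd items kn (p + 1) = pvWnd items kn p ++ [items.getD p 0] := by
  unfold pvWnd
  rw [List.take_add_one, List.getElem?_eq_getElem hplen, List.getD_eq_getElem _ _ hplen]
  have h1 : p + 1 - kn = 0 := by omega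
  have h2 : p - kn = 0 := by omega
  rw [h1, h2]
  simp

lemma pvWnd_evict (items : List Int) (kn p : Nat) (hko : kn ≤ p) (hk1 : 1 ≤ kn)
    (hplen : p < items.length) :
    pvWnd items kn (p + 1) = (pvWnd items kn p ++ [items.getD p 0]).tail := by
  unfold pvWnd
  rw [List.take_add_one, List.getElem?_eq_getElem hplen, List.getD_eq_getElem _ _ hplen]
  simp only [Option.toList_some]
  rw [List.drop_append_of_le_length (by simp; omega)]
  have h2 : p + 1 - kn = p - kn + 1 := by omega
  rw [h2, ← List.drop_drop]
  cases h : List.drop (p - kn) (items.take p) with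
  | nil =>
    exfalso
    have := congrArg List.length h
    simp at this
    omega
  | cons c A' => simp

-- the A-side fold gains exactly one comparison when B's step i = p reaches a full window
lemma pvSA_succ (items : List Int) (k : Int) (hk : 1 ≤ k) (p : Nat)
    (hcmp : k.toNat ≤ p + 1) (hp : p < items.length) :
    (PySem.List.pyRange 0 ((p + 1 + 1 - k.toNat : Nat) : Int) 1).foldl (mdsStepA items k) (0, 0)
    = (if pvMx (pvWnd items k.toNat (p + 1)) - pvMn (pvWnd items k.toNat (p + 1))
          > ((PySem.List.pyRange 0 ((p + 1 - k.toNat : Nat) : Int) 1).foldl (mdsStepA items k) (0, 0)).1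
       then (pvMx (pvWnd items k.toNat (p + 1)) - pvMn (pvWnd items k.toNat (p + 1)), (p : Int) - k + 1)
       else (PySem.List.pyRange 0 ((p + 1 - k.toNat : Nat) : Int) 1).foldl (mdsStepA items k) (0, 0)) := by
  have hkk : ((k.toNat : Int)) = k := Int.toNat_of_nonneg (by omega)
  have hw : pvWnd items k.toNat (p + 1) =
      PySem.List.slice items (some ((p + 1 - k.toNat : Nat) : Int))
        (some (((p + 1 - k.toNat : Nat) : Int) + k)) := by
    have h1 : ((p + 1 - k.toNat : Nat) : Int) + k
        = ((p + 1 - k.toNat : Nat) : Int) + ((k.toNat : Nat) : Int) := by omega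
    rw [h1, PySem.List.slice_natCast_add, pvWnd, List.drop_take]
    congr 1
    omega
  obtain ⟨v, t, hvt⟩ := List.exists_cons_of_ne_nil
    (pvWnd_ne_nil items k.toNat (p + 1) (by omega) (by omega) (by omega))
  have hsub : PySem.List.slice items (some ((p + 1 - k.toNat : Nat) : Int))
      (some (((p + 1 - k.toNat : Nat) : Int) + k)) = v :: t := by rw [← hw, hvt]
  rw [show ((p + 1 + 1 - k.toNat : Nat) : Int) = ((p + 1 - k.toNat : Nat) : Int) + 1 by omega,
    PySem.List.pyRange_one_succ_right (by positivity), List.foldl_append]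
  simp only [List.foldl_cons, List.foldl_nil]
  rw [mdsStepA_eq items k _ _ v t hsub, hvt]
  have hj : ((p + 1 - k.toNat : Nat) : Int) = (p : Int) - k + 1 := by omega
  rw [hj]

-- the main invariant of B's single pass: after p steps the two stacks are the annotated
-- halves of the current window and (m, mpos) equals A's fold over the comparisons done so far
lemma pvInv (items : List Int) (k : Int) (hk : 1 ≤ k) (p : Nat) (hp : p ≤ items.length) :
    ∃ iv ov : List Int,
      (PySem.List.pyRange 0 (p : Int) 1).foldl (mdsStepB items k) ([], [], 0, 0)
        = (pvAnn iv, pvAnn ov,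
           (PySem.List.pyRange 0 ((p + 1 - k.toNat : Nat) : Int) 1).foldl (mdsStepA items k) (0, 0))
      ∧ ov ++ iv.reverse = pvWnd items k.toNat p := by
  have hkk : ((k.toNat : Int)) = k := Int.toNat_of_nonneg (by omega)
  set kn := k.toNat with hkn
  have hk1 : 1 ≤ kn := by omega
  induction p with
  | zero =>
    refine ⟨[], [], ?_, ?_⟩
    · rw [show ((0 : Nat) : Int) = 0 from rfl, PySem.List.pyRange_one_eq_nil le_rfl,
        show ((0 + 1 - kn : Nat) : Int) = 0 by omega, PySem.List.pyRange_one_eq_nil le_rfl]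
      rfl
    · simp [pvWnd]
  | succ p ih =>
    have hplen : p < items.length := by omega
    obtain ⟨iv, ov, heq, hw⟩ := ih (by omega)
    have hcast : ((p + 1 : Nat) : Int) = (p : Int) + 1 := by push_cast; ring
    rw [hcast, PySem.List.pyRange_one_succ_right (by positivity), List.foldl_append, heq]
    simp only [List.foldl_cons, List.foldl_nil]
    have hx : PySem.List.pyGetD items ((p : Nat) : Int) 0 = items.getD p 0 := by
      simp
    set x := items.getD p 0 with hxd
    by_cases hcmp : kn ≤ p + 1
    · -- a comparison happens at this step
      have hc2 : k - 1 ≤ ((p : Nat) : Int) := by omega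
      rw [pvSA_succ items k hk p (by omega) hplen]
      by_cases hev : kn ≤ p
      · -- eviction also happens
        have hc1 : k ≤ ((p : Nat) : Int) := by omega
        cases ov with
        | nil =>
          -- out is empty: transfer the in-stack, pop the front, in-stack becomes empty
          have hwnil : iv.reverse = pvWnd items kn p := by simpa using hw
          have hwnd : pvWnd items kn (p + 1) = ((x :: iv).reverse).tail := by
            rw [pvWnd_evict items kn p hev hk1 hplen, ← hwnil, List.reverse_cons, ← hxd]
          obtain ⟨v, t, hvt⟩ := List.exists_cons_of_ne_nil
            (pvWnd_ne_nil items kn (p + 1) hk1 (by omega) (by omega))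
          have hw' : ((x :: iv).reverse).tail ++ ([] : List Int).reverse = v :: t := by
            rw [List.reverse_nil, List.append_nil, ← hwnd, hvt]
          have htops := pvTops_ann _ _ _ _ hw'
          rw [show pvAnn ([] : List Int) = [] from rfl] at htops
          have htr : pvTransfer (pvAnn (x :: iv)) [] = pvAnn ((x :: iv).reverse) := by
            have h := pvAnn_transfer (x :: iv) []
            rwa [show pvAnn ([] : List Int) = [] from rfl, List.append_nil] at h
          refine ⟨[], ((x :: iv).reverse).tail, ?_, ?_⟩
          · rw [show pvAnn ([] : List Int) = [] from rfl]
            simp only [mdsStepB, hx, if_pos hc1, if_pos hc2, List.isEmpty_nil, if_true,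
              pvAnn_push, htr, pvAnn_tail, htops, ← hkn, hvt, Prod.mk.eta]
          · rw [hwnd]
            simp
        | cons a t1 =>
          have hwnd : pvWnd items kn (p + 1) = t1 ++ (x :: iv).reverse := by
            rw [pvWnd_evict items kn p hev hk1 hplen, ← hw, ← hxd]
            simp
          obtain ⟨v, t, hvt⟩ := List.exists_cons_of_ne_nil
            (pvWnd_ne_nil items kn (p + 1) hk1 (by omega) (by omega))
          have hw' : t1 ++ (x :: iv).reverse = v :: t := by rw [← hwnd, hvt]
          have htops := pvTops_ann _ _ _ _ hw'
          refine ⟨x :: iv, t1, ?_, ?_⟩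
          · simp only [mdsStepB, hx, if_pos hc1, if_pos hc2, pvAnn_push, pvAnn_isEmpty,
              List.isEmpty_cons, Bool.false_eq_true, if_false, pvAnn_tail, List.tail_cons,
              htops, ← hkn, hvt, Prod.mk.eta]
          · rw [hwnd]
      · -- p + 1 = kn: first full window, no eviction
        have hc1 : ¬ (k ≤ ((p : Nat) : Int)) := by omega
        have hwnd : pvWnd items kn (p + 1) = ov ++ (x :: iv).reverse := by
          rw [pvWnd_grow items kn p (by omega) hplen, ← hw, ← hxd, List.reverse_cons,
            ← List.append_assoc]
        obtain ⟨v, t, hvt⟩ := List.exists_cons_of_ne_nil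
          (pvWnd_ne_nil items kn (p + 1) hk1 (by omega) (by omega))
        have hw' : ov ++ (x :: iv).reverse = v :: t := by rw [← hwnd, hvt]
        have htops := pvTops_ann _ _ _ _ hw'
        refine ⟨x :: iv, ov, ?_, ?_⟩
        · simp only [mdsStepB, hx, if_neg hc1, if_pos hc2, pvAnn_push,
            htops, ← hkn, hvt, Prod.mk.eta]
        · rw [hwnd]
    · -- window still growing, no comparison
      have hc1 : ¬ (k ≤ ((p : Nat) : Int)) := by omega
      have hc2 : ¬ (k - 1 ≤ ((p : Nat) : Int)) := by omega
      refine ⟨x :: iv, ov, ?_, ?_⟩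
      · simp only [mdsStepB, hx, if_neg hc1, if_neg hc2, pvAnn_push]
        rw [show ((p + 1 + 1 - kn : Nat) : Int) = ((p + 1 - kn : Nat) : Int) by omega]
      · rw [pvWnd_grow items kn p (by omega) hplen, ← hw, ← hxd, List.reverse_cons,
          ← List.append_assoc]

-- ===== VERDICT (by name: the statement is the Claim_ definition above) =====
theorem maximum_difference_sublist_spec : Claim_equal_maximum_difference_sublist := by
  intro items k _ hpre
  unfold Spec_maximum_difference_sublist
  have hk : 1 ≤ k := hpre
  obtain ⟨iv, ov, heq, -⟩ := pvInv items k hk items.length le_rfl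
  have hr : PySem.List.pyRange 0 ((items.length : Int) - k + 1) 1
      = PySem.List.pyRange 0 ((items.length + 1 - k.toNat : Nat) : Int) 1 := by
    have hkk : ((k.toNat : Int)) = k := Int.toNat_of_nonneg (by omega)
    by_cases h : k.toNat ≤ items.length + 1
    · congr 1; omega
    · rw [PySem.List.pyRange_one_eq_nil (by omega), PySem.List.pyRange_one_eq_nil (by omega)]
  simp only [maximum_difference_sublist, maximum_difference_sublist_alt, hr, heq]
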